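-- pv_equiv track=rewrite | github.com/wyuc/EduCraft | scripts/scripts_to_excel.py | filter_algorithms
-- ===== SOURCE A (Python) =====
-- def filter_algorithms(algo_provider_pairs, selected_algos, selected_providers=None):
--     """
--     Filter algorithm-provider pairs to only include selected algorithms and/or providers.
--
--     Args:
--         algo_provider_pairs: List of (algo, provider) tuples
--         selected_algos: List of algorithm names to include
--         selected_providers: List of provider names to include
--
--     Returns:
--         list: Filtered list of (algo, provider) tuples
--     """
--     # If neither algos nor providers specified, return all
--     if not selected_algos and not selected_providers:
--         return algo_provider_pairs
--
--     filtered_pairs = algo_provider_pairs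
--
--     # Filter by algorithms if specified
--     if selected_algos:
--         # Convert to lowercase for case-insensitive comparison
--         selected_algos_lower = [algo.lower() for algo in selected_algos]
--
--         # Filter pairs where the algorithm is in the selected list
--         filtered_pairs = [
--             (algo, provider) for (algo, provider) in filtered_pairs
--             if algo.lower() in selected_algos_lower
--         ]
--
--     # Filter by providers if specified
--     if selected_providers:
--         # Convert to lowercase for case-insensitive comparison
--         selected_providers_lower = [provider.lower() for provider in selected_providers]
--
--         # Filter pairs where the provider is in the selected list
--         filtered_pairs = [
--             (algo, provider) for (algo, provider) in filtered_pairs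
--             if provider.lower() in selected_providers_lower
--         ]
--
--     return filtered_pairs
-- ===== SOURCE B (Python) =====
-- def filter_algorithms(algo_provider_pairs, selected_algos, selected_providers=None):
--     # If neither algos nor providers specified, return all (same object)
--     if not selected_algos and not selected_providers:
--         return algo_provider_pairs
--     result = []
--     for algo, provider in algo_provider_pairs:
--         if selected_algos and not _selected(algo, selected_algos):
--             continue
--         if selected_providers and not _selected(provider, selected_providers):
--             continue
--         result.append((algo, provider))
--     return result
--
-- def _selected(name, candidates):
--     low = name.lower()
--     for cand in candidates:
--         if cand.lower() == low:
--             return True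
--     return False
-- ===== Notes on version B (the rewrite author's own statement) =====
-- stated objective: alternative
-- what changed: Replaces A's two staged list comprehensions over precomputed lowercased selector lists by one explicit accumulator loop with continue guards, where a helper compares each name case-insensitively against the raw selectors element by element with early return; this trades A's one-time lowering of the selectors for per-pair rescans (not faster).
import Mathlib
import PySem

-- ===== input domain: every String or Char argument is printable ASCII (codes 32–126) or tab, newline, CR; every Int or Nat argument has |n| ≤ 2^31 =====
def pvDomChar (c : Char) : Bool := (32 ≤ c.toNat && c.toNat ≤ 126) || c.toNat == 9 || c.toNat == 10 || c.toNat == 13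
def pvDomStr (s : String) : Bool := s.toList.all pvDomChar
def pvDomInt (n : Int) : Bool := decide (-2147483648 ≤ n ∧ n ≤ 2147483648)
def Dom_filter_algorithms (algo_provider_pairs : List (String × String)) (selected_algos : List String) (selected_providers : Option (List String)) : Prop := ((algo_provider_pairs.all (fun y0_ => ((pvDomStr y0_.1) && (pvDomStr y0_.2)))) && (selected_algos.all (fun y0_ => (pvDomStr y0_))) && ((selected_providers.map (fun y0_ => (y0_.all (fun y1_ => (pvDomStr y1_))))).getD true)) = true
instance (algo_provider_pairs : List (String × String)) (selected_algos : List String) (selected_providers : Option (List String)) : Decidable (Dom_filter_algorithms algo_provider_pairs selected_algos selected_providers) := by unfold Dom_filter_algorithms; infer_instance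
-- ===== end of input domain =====

-- B replaces A's two staged comprehensions over precomputed lowercased selector lists by one explicit accumulator loop with continue guards and an early-return case-insensitive scan helper (alternative decomposition; trades A's precomputed lowered lists for per-pair rescans, so it claims no speed).


-- ===== PORT A =====
def filter_algorithms (algo_provider_pairs : List (String × String)) (selected_algos : List String) (selected_providers : Option (List String)) : List (String × String) :=
  if selected_algos.isEmpty && ((selected_providers.map List.isEmpty).getD true) then
    algo_provider_pairs
  else
    let filtered_pairs := algo_provider_pairs
    let filtered_pairs :=
      if !selected_algos.isEmpty then
        let selected_algos_lower := selected_algos.map PySem.Str.lower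
        filtered_pairs.filter (fun ap => selected_algos_lower.contains (PySem.Str.lower ap.1))
      else filtered_pairs
    let filtered_pairs :=
      match selected_providers with
      | some l =>
        if !l.isEmpty then
          let selected_providers_lower := l.map PySem.Str.lower
          filtered_pairs.filter (fun ap => selected_providers_lower.contains (PySem.Str.lower ap.2))
        else filtered_pairs
      | none => filtered_pairs
    filtered_pairs

-- ===== PORT B =====
-- helper `_selected`: early-return scan comparing each candidate lowercased against the lowercased name
def pvSelected (name : String) (candidates : List String) : Bool :=
  let low := PySem.Str.lower name
  candidates.any (fun cand => PySem.Str.lower cand == low)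

def filter_algorithms_alt (algo_provider_pairs : List (String × String)) (selected_algos : List String) (selected_providers : Option (List String)) : List (String × String) :=
  if selected_algos.isEmpty && ((selected_providers.map List.isEmpty).getD true) then
    algo_provider_pairs
  else
    algo_provider_pairs.foldl (fun result ap =>
      if !selected_algos.isEmpty && !pvSelected ap.1 selected_algos then
        result                              -- continue
      else if (match selected_providers with
               | some l => !l.isEmpty && !pvSelected ap.2 l
               | none => false) then
        result                              -- continue
      else
        result ++ [ap]) []

-- ===== PRECONDITION & SPEC =====
def Spec_filter_algorithms (algo_provider_pairs : List (String × String)) (selected_algos : List String) (selected_providers : Option (List String)) (out : List (String × String)) : Prop := out = filter_algorithms_alt algo_provider_pairs selected_algos selected_providers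
instance (algo_provider_pairs : List (String × String)) (selected_algos : List String) (selected_providers : Option (List String)) (out : List (String × String)) : Decidable (Spec_filter_algorithms algo_provider_pairs selected_algos selected_providers out) := by unfold Spec_filter_algorithms; infer_instance

-- ===== CLAIM =====
def Claim_equal_filter_algorithms : Prop := ∀ (algo_provider_pairs : List (String × String)) (selected_algos : List String) (selected_providers : Option (List String)), Dom_filter_algorithms algo_provider_pairs selected_algos selected_providers → Spec_filter_algorithms algo_provider_pairs selected_algos selected_providers (filter_algorithms algo_provider_pairs selected_algos selected_providers)

-- ===== LEMMAS AND PROOFS =====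
-- membership in the precomputed lowered list (A) = early-return case-insensitive scan (B)
theorem pvSelected_eq_contains (name : String) (cs : List String) :
    pvSelected name cs = (cs.map PySem.Str.lower).contains (PySem.Str.lower name) := by
  simp only [pvSelected, List.contains_eq_any_beq, List.any_map]
  refine congrArg cs.any (funext fun x => ?_)
  simp [eq_comm]

-- B's loop as a filter of the input by its combined keep-condition
theorem alt_loop_eq_filter (pairs : List (String × String)) (sels : List String) (selp : Option (List String)) :
    pairs.foldl (fun result ap =>
      if !sels.isEmpty && !pvSelected ap.1 sels then result
      else if (match selp with
               | some l => !l.isEmpty && !pvSelected ap.2 l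
               | none => false) then result
      else result ++ [ap]) [] =
    pairs.filter (fun ap =>
      !(!sels.isEmpty && !pvSelected ap.1 sels) &&
      !(match selp with
        | some l => !l.isEmpty && !pvSelected ap.2 l
        | none => false)) := by
  rw [PySem.List.foldl_congr_mem (g := fun result ap =>
      if (!(!sels.isEmpty && !pvSelected ap.1 sels) &&
          !(match selp with
            | some l => !l.isEmpty && !pvSelected ap.2 l
            | none => false)) then result ++ [ap] else result)]
  · exact PySem.List.foldl_append_if_eq_filter _ _ _
  · intro acc ap _
    cases h1 : (!sels.isEmpty && !pvSelected ap.1 sels) <;>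
      cases h2 : (match selp with
                  | some l => !l.isEmpty && !pvSelected ap.2 l
                  | none => false) <;> simp

-- ===== VERDICT =====
theorem filter_algorithms_spec : Claim_equal_filter_algorithms := by
  intro pairs sels selp _
  unfold Spec_filter_algorithms filter_algorithms filter_algorithms_alt
  rw [alt_loop_eq_filter]
  cases selp with
  | none =>
    cases h : sels.isEmpty <;>
      simp [pvSelected_eq_contains]
  | some l =>
    cases h : sels.isEmpty <;> cases h2 : l.isEmpty <;>
      simp [h2, pvSelected_eq_contains, List.filter_filter, Bool.and_comm]
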